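-- pv_equiv track=rewrite | github.com/AuctortiA/pretty_python | main.py | fix_blanklines
-- ===== SOURCE A (Python) =====
-- def fix_blanklines(_code):
--     """
--
--     :param _code:
--     :return:
--     """
--
--     # first limit all blanklines to 1
--     current_pointer = 0
--     remove_line = False
--     while current_pointer < len(_code):
--         line = _code[current_pointer]
--         if line == '':
--             if remove_line:
--                 _code.pop(current_pointer)
--                 current_pointer -= 1
--             else:
--                 remove_line = True
--         else:
--             remove_line = False
--
--         current_pointer += 1
--
--     current_pointer = 0
--     while current_pointer < len(_code):  # make this ignore comments (probably in a similar way to how we did it with the indentation.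
--         line = _code[current_pointer]
--
--         if current_pointer != 0:
--             if line.lstrip().startswith(('class', 'def')):
--                 # Only adds double spacing to first level
--                 if _code[current_pointer-1] != '':
--                     _code.insert(current_pointer, '')
--                     current_pointer += 1
--                 if len(line) == len(line.lstrip()):
--                     _code.insert(current_pointer, '')
--                     current_pointer += 1
--
--         current_pointer += 1
--     return _code
-- ===== SOURCE B (Python) =====
-- def fix_blanklines(_code):
--     """Single forward pass building a new list (instead of A's two index-based
--     while loops with pop/insert); mutates _code in place via slice assignment."""
--     result = []
--     prev_blank = False
--     for line in _code:
--         if line == '':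
--             if not prev_blank:
--                 result.append(line)
--             prev_blank = True
--         else:
--             if result and line.lstrip().startswith(('class', 'def')):
--                 if result[-1] != '':
--                     result.append('')
--                 if len(line) == len(line.lstrip()):
--                     result.append('')
--             result.append(line)
--             prev_blank = False
--     _code[:] = result
--     return _code
-- ===== Notes on version B (the rewrite author's own statement) =====
-- stated objective: simpler
-- what changed: Replaced A's two index-based while loops that mutate the list with pop/insert by a single forward pass that builds a fresh result list, collapsing blank runs with a prev_blank flag and inserting the class/def spacing by looking at result[-1], then writes it back with _code[:] = result.
import Mathlib
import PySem

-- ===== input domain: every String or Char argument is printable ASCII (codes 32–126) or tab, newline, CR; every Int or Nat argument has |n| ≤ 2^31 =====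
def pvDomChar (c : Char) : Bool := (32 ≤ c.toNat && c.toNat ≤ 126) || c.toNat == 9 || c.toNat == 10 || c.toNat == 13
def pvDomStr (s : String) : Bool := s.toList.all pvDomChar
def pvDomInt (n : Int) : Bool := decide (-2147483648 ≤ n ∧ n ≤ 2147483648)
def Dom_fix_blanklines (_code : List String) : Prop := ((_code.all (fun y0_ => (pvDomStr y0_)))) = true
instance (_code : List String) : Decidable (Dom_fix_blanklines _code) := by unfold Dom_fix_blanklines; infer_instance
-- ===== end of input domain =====

-- B replaces A's two index-based in-place while loops (pop/insert) by one forward pass that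
-- builds a fresh result list; A and B both mutate _code in place in Python — the theorems here
-- are about the RETURN value (which is also the final list content for both).

-- line.lstrip().startswith(('class', 'def'))  — computed literally by both Pythons
def pvIsCD (line : String) : Bool :=
  PySem.Str.startswith (PySem.Str.lstrip line) "class" || PySem.Str.startswith (PySem.Str.lstrip line) "def"

-- len(line) == len(line.lstrip())  — computed literally by both Pythons
def pvIsTop (line : String) : Bool :=
  PySem.Str.len line == PySem.Str.len (PySem.Str.lstrip line)

-- ===== PORT A =====
-- first while loop: limit all blank runs to one blank line
-- _code.pop(current_pointer) with current_pointer < len(_code) is exactly List.eraseIdx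
def fixA_loop1 : Nat → List String → Nat → Bool → List String
  | 0, code, _, _ => code
  | fuel + 1, code, cp, rm =>
    if h : cp < code.length then
      let line := code[cp]
      if line = "" then
        if rm then
          -- pop, current_pointer -= 1, then += 1: pointer unchanged
          fixA_loop1 fuel (code.eraseIdx cp) cp rm
        else fixA_loop1 fuel code (cp + 1) true
      else fixA_loop1 fuel code (cp + 1) false
    else code

-- second while loop: insert blank lines before class/def
-- _code.insert(i, '') is PySem.List.insert at an in-range Nat index
def fixA_loop2 : Nat → List String → Nat → List String
  | 0, code, _ => code
  | fuel + 1, code, cp =>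
    if h : cp < code.length then
      let line := code[cp]
      if cp ≠ 0 ∧ pvIsCD line = true then
        let s1 : List String × Nat :=
          if code[cp - 1]! ≠ "" then (PySem.List.insert code (cp : Int) "", cp + 1) else (code, cp)
        let s2 : List String × Nat :=
          if pvIsTop line = true then (PySem.List.insert s1.1 (s1.2 : Int) "", s1.2 + 1) else s1
        fixA_loop2 fuel s2.1 (s2.2 + 1)
      else fixA_loop2 fuel code (cp + 1)
    else code

-- the fuel arguments only bound the number of iterations (the loops' measure len - cp
-- decreases every iteration); they never cut a computation short
def fix_blanklines (_code : List String) : List String :=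
  let c1 := fixA_loop1 _code.length _code 0 false
  fixA_loop2 c1.length c1 0

-- ===== PORT B =====
-- one forward pass: collapse blank runs with prev_blank, insert spacing by looking at result[-1]
def fixB_loop (ls : List String) (res : List String) (pb : Bool) : List String :=
  match ls with
  | [] => res
  | line :: rest =>
    if line = "" then
      fixB_loop rest (if pb then res else res ++ [line]) true
    else
      let res1 :=
        if res ≠ [] ∧ pvIsCD line = true then
          (if res.getLast! ≠ "" then res ++ [""] else res) ++ (if pvIsTop line = true then [""] else [])
        else res
      fixB_loop rest (res1 ++ [line]) false

def fix_blanklines_alt (_code : List String) : List String :=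
  fixB_loop _code [] false

-- ===== PRECONDITION & SPEC =====
def Spec_fix_blanklines (_code : List String) (out : List String) : Prop := out = fix_blanklines_alt _code
instance (_code : List String) (out : List String) : Decidable (Spec_fix_blanklines _code out) := by unfold Spec_fix_blanklines; infer_instance

-- ===== CLAIM (what is proved, stated in full; the proofs are below) =====
def Claim_equal_fix_blanklines : Prop := ∀ (_code : List String), Dom_fix_blanklines _code → Spec_fix_blanklines _code (fix_blanklines _code)

-- ===== LEMMAS AND PROOFS =====

-- reference phase 1: collapse runs of blank lines to a single blank
def pvCollapse : List String → Bool → List String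
  | [], _ => []
  | l :: ls, rm =>
    if l = "" then (if rm then pvCollapse ls true else l :: pvCollapse ls true)
    else l :: pvCollapse ls false

-- blanks inserted before `line` when the previous line is `prev`
def pvBlanks (prev line : String) : List String :=
  if pvIsCD line = true then
    (if prev ≠ "" then [""] else []) ++ (if pvIsTop line = true then [""] else [])
  else []

-- reference phase 2 on the suffix after `prev`
def pvIns : String → List String → List String
  | _, [] => []
  | prev, l :: ls => pvBlanks prev l ++ l :: pvIns l ls

theorem fixA_loop1_eq : ∀ (fuel : Nat) (code : List String) (cp : Nat) (rm : Bool),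
    code.length - cp ≤ fuel →
    fixA_loop1 fuel code cp rm = code.take cp ++ pvCollapse (code.drop cp) rm := by
  intro fuel
  induction fuel with
  | zero =>
    intro code cp rm hn
    rw [List.drop_of_length_le (by omega), List.take_of_length_le (by omega)]
    simp [fixA_loop1, pvCollapse]
  | succ n IH =>
    intro code cp rm hn
    simp only [fixA_loop1]
    by_cases h : cp < code.length
    · rw [dif_pos h]
      have hdrop : code.drop cp = code[cp] :: code.drop (cp + 1) :=
        (List.getElem_cons_drop h).symm
      have htake : code.take (cp + 1) = code.take cp ++ [code[cp]] := by
        rw [List.take_add_one]; simp [List.getElem?_eq_getElem h]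
      by_cases hb : code[cp] = ""
      · rw [if_pos hb]
        cases rm with
        | true =>
          rw [if_pos rfl]
          have hlen : (code.eraseIdx cp).length - cp ≤ n := by
            simp [List.length_eraseIdx, h]; omega
          rw [IH _ _ _ hlen, List.eraseIdx_eq_take_drop_succ,
              List.take_append_of_le_length (by simp [List.length_take]; omega), List.take_take,
              List.drop_append_of_le_length (by simp [List.length_take]; omega)]
          rw [hdrop]
          simp [pvCollapse, hb, List.drop_take]
        | false =>
          simp only [Bool.false_eq_true, if_false]
          have hlen : code.length - (cp + 1) ≤ n := by omega
          rw [IH _ _ _ hlen, hdrop, htake, List.append_assoc]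
          simp [pvCollapse, hb]
      · rw [if_neg hb]
        have hlen : code.length - (cp + 1) ≤ n := by omega
        rw [IH _ _ _ hlen, hdrop, htake, List.append_assoc]
        simp [pvCollapse, hb]
    · rw [dif_neg h]
      rw [List.drop_of_length_le (by omega), List.take_of_length_le (by omega)]
      simp [pvCollapse]

theorem pv_getLast!_concat (l : List String) (a : String) : (l ++ [a]).getLast! = a := by
  simp

theorem fixA_loop2_eq : ∀ (fuel : Nat) (code : List String) (cp : Nat),
    code.length - cp ≤ fuel → 1 ≤ cp → cp ≤ code.length →
    fixA_loop2 fuel code cp = code.take cp ++ pvIns (code[cp - 1]!) (code.drop cp) := by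
  intro fuel
  induction fuel with
  | zero =>
    intro code cp hn h1 h2
    rw [List.drop_of_length_le (by omega), List.take_of_length_le (by omega)]
    simp [fixA_loop2, pvIns]
  | succ n IH =>
    intro code cp hn h1 h2
    simp only [fixA_loop2]
    by_cases h : cp < code.length
    · rw [dif_pos h]
      have hdrop : code.drop cp = code[cp] :: code.drop (cp + 1) :=
        (List.getElem_cons_drop h).symm
      have htake : code.take (cp + 1) = code.take cp ++ [code[cp]] := by
        rw [List.take_add_one]; simp [List.getElem?_eq_getElem h]
      have hl : (code.take cp).length = cp := List.length_take_of_le (by omega)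
      by_cases hcd : pvIsCD code[cp] = true
      · rw [if_pos ⟨by omega, hcd⟩]
        -- after the inserts, the loop continues past the inserted blanks and the class/def line
        have key : ∀ (B : List String) (q : Nat), q = cp + B.length + 1 →
            fixA_loop2 n (code.take cp ++ B ++ code.drop cp) q =
              (code.take cp ++ B ++ [code[cp]]) ++ pvIns code[cp] (code.drop (cp + 1)) := by
          intro B q hq
          have hlenL : (code.take cp ++ B ++ code.drop cp).length
              = code.length + B.length := by
            simp [hl]; omega
          have hm : (code.take cp ++ B ++ code.drop cp).length - q ≤ n := by omega
          rw [IH _ q hm (by omega) (by omega)]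
          have hpre : (code.take cp ++ B ++ [code[cp]]).length = q := by
            simp [hl]; omega
          have hsplit : code.take cp ++ B ++ code.drop cp
              = (code.take cp ++ B ++ [code[cp]]) ++ code.drop (cp + 1) := by
            rw [hdrop]; simp
          have ht2 : (code.take cp ++ B ++ code.drop cp).take q
              = code.take cp ++ B ++ [code[cp]] := by
            rw [hsplit, List.take_left' hpre]
          have hd2 : (code.take cp ++ B ++ code.drop cp).drop q
              = code.drop (cp + 1) := by
            rw [hsplit, List.drop_left' hpre]
          have hg : (code.take cp ++ B ++ code.drop cp)[q - 1]! = code[cp] := by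
            rw [hdrop]
            rw [getElem!_pos _ _ (by simp [hl]; omega)]
            rw [List.getElem_append_right (by simp [hl]; omega)]
            have h0 : q - 1 = cp + B.length := by omega
            simp [hl, h0]
          rw [ht2, hd2, hg]
        by_cases hp : code[cp - 1]! ≠ "" <;> by_cases ht : pvIsTop code[cp] = true
        · -- two inserts
          simp only [if_pos hp, if_pos ht]
          rw [PySem.List.insert_natCast code cp "" (by omega)]
          rw [PySem.List.insert_natCast _ (cp + 1) "" (by simp [hl]; omega)]
          rw [show code.take cp ++ "" :: code.drop cp
                = (code.take cp ++ [""]) ++ code.drop cp by simp]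
          rw [List.take_left' (by simp [hl]), List.drop_left' (by simp [hl])]
          have k2 := key ["", ""] (cp + 1 + 1 + 1) (by simp)
          simp only [List.append_assoc, List.cons_append, List.nil_append,
            List.singleton_append] at k2 ⊢
          rw [k2, hdrop]
          have hp' : code[cp - 1]?.getD "" ≠ "" := by simpa using hp
          simp [pvIns, pvBlanks, hcd, hp', ht]
        · -- only the first insert
          simp only [if_pos hp, if_neg ht]
          rw [PySem.List.insert_natCast code cp "" (by omega)]
          have k2 := key [""] (cp + 1 + 1) (by simp)
          simp only [List.append_assoc, List.cons_append, List.nil_append,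
            List.singleton_append] at k2 ⊢
          rw [k2, hdrop]
          have hp' : code[cp - 1]?.getD "" ≠ "" := by simpa using hp
          simp [pvIns, pvBlanks, hcd, hp', ht]
        · -- only the second insert
          simp only [if_neg hp, if_pos ht]
          rw [PySem.List.insert_natCast code cp "" (by omega)]
          have k2 := key [""] (cp + 1 + 1) (by simp)
          simp only [List.append_assoc, List.cons_append, List.nil_append,
            List.singleton_append] at k2 ⊢
          rw [k2, hdrop]
          simp only [ne_eq, Decidable.not_not] at hp
          simp [pvIns, pvBlanks, hcd, hp, ht]
        · -- no insert
          simp only [if_neg hp, if_neg ht]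
          have k2 := key [] (cp + 1) (by simp)
          rw [show code.take cp ++ ([] : List String) ++ code.drop cp = code by
                simp [List.take_append_drop]] at k2
          rw [k2, hdrop]
          simp only [ne_eq, Decidable.not_not] at hp
          simp [pvIns, pvBlanks, hcd, hp, ht]
          rw [htake, List.append_assoc]
          rfl
      · rw [if_neg (by rintro ⟨-, hc⟩; exact hcd hc)]
        have hlen : code.length - (cp + 1) ≤ n := by omega
        rw [IH _ _ hlen (by omega) (by omega)]
        have hg1 : code[cp + 1 - 1]! = code[cp] := by
          rw [getElem!_pos _ _ (by omega)]
          simp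
        rw [hg1, hdrop]
        simp only [pvIns]
        rw [show pvBlanks code[cp - 1]! code[cp] = [] by simp [pvBlanks, hcd]]
        rw [htake, List.nil_append, List.append_assoc]
        rfl
    · rw [dif_neg h]
      rw [List.drop_of_length_le (by omega), List.take_of_length_le (by omega)]
      simp [pvIns]

theorem fixB_main : ∀ (ls res : List String), res ≠ [] →
    fixB_loop ls res (res.getLast! == "") =
      res ++ pvIns res.getLast! (pvCollapse ls (res.getLast! == "")) := by
  intro ls
  induction ls with
  | nil => intro res _; simp [fixB_loop, pvIns, pvCollapse]
  | cons line rest IH =>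
    intro res hres
    simp only [fixB_loop]
    by_cases hb : line = ""
    · subst hb
      rw [if_pos rfl]
      by_cases hp : res.getLast! = ""
      · rw [hp]
        simp only [beq_self_eq_true, ite_true]
        have h2 := IH res hres
        rw [hp] at h2
        simpa [pvCollapse] using h2
      · have hpb : (res.getLast! == "") = false := by
          rw [beq_eq_false_iff_ne]; exact hp
        rw [hpb]
        simp only [Bool.false_eq_true, ite_false]
        have h2 := IH (res ++ [""]) (by simp)
        rw [pv_getLast!_concat] at h2
        simp only [beq_self_eq_true] at h2
        rw [h2]
        have hcd0 : pvIsCD "" = false := by decide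
        simp [pvCollapse, hpb, pvIns, pvBlanks, hcd0]
    · rw [if_neg hb]
      have h2 := IH
        ((if res ≠ [] ∧ pvIsCD line = true then
            (if res.getLast! ≠ "" then res ++ [""] else res) ++
              (if pvIsTop line = true then [""] else [])
          else res) ++ [line]) (by simp)
      rw [pv_getLast!_concat] at h2
      have hlb : (line == "") = false := by
        rw [beq_eq_false_iff_ne]; exact hb
      rw [hlb] at h2
      rw [h2]
      have hc : pvCollapse (line :: rest) (res.getLast! == "") =
          line :: pvCollapse rest false := by
        simp [pvCollapse, hb]
      rw [hc]
      simp only [pvIns, pvBlanks, hres, ne_eq, not_false_iff, true_and]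
      by_cases hcd : pvIsCD line = true <;>
        by_cases ht : pvIsTop line = true <;>
        simp [hcd, ht, List.append_assoc] <;>
        split_ifs <;> simp

-- ===== VERDICT (by name: the statement is the Claim_ definition above) =====
theorem fix_blanklines_spec : Claim_equal_fix_blanklines := by
  unfold Claim_equal_fix_blanklines
  intro code _
  unfold Spec_fix_blanklines fix_blanklines fix_blanklines_alt
  rw [fixA_loop1_eq code.length code 0 false (by omega)]
  simp only [List.take_zero, List.drop_zero, List.nil_append]
  cases hcc : pvCollapse code false with
  | nil =>
    cases code with
    | nil => simp [fixA_loop2, fixB_loop]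
    | cons line rest =>
      -- pvCollapse of a nonempty list is nonempty: contradiction
      exfalso
      by_cases hb : line = "" <;> simp [pvCollapse, hb] at hcc
  | cons x t =>
    have hstep : fixA_loop2 (x :: t).length (x :: t) 0 =
        (x :: t).take 1 ++ pvIns ((x :: t)[1 - 1]!) ((x :: t).drop 1) := by
      simp only [List.length_cons, fixA_loop2]
      rw [dif_pos (by omega : (0 : Nat) < t.length + 1)]
      rw [if_neg (by rintro ⟨hz, -⟩; exact hz rfl)]
      exact fixA_loop2_eq t.length (x :: t) 1 (by simp) (by omega) (by simp)
    rw [hstep]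
    have hx : ((x :: t)[1 - 1]!) = x := by
      rw [getElem!_pos _ _ (by simp)]
      simp
    rw [hx]
    simp only [List.take_succ_cons, List.take_zero, List.drop_succ_cons, List.drop_zero]
    -- B side
    cases code with
    | nil => simp [pvCollapse] at hcc
    | cons line rest =>
      by_cases hb : line = ""
      · subst hb
        have hcc' : x = "" ∧ t = pvCollapse rest true := by
          constructor <;> [skip; skip] <;>
            (have := hcc; simp [pvCollapse] at this; tauto)
        obtain ⟨hx0, ht0⟩ := hcc'
        subst hx0; subst ht0
        have h2 := fixB_main rest [""] (by simp)
        rw [show ([""] : List String).getLast! = "" from pv_getLast!_concat [] ""] at h2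
        simp only [beq_self_eq_true] at h2
        simp [fixB_loop, h2]
      · have hcc' : x = line ∧ t = pvCollapse rest false := by
          constructor <;>
            (have := hcc; simp [pvCollapse, hb] at this; tauto)
        obtain ⟨hx0, ht0⟩ := hcc'
        subst hx0; subst ht0
        have h2 := fixB_main rest [x] (by simp)
        rw [show ([x] : List String).getLast! = x from pv_getLast!_concat [] x] at h2
        have hlb : (x == "") = false := by rw [beq_eq_false_iff_ne]; exact hb
        rw [hlb] at h2
        simp [fixB_loop, hb, h2]
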